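-- pv_equiv track=rewrite | github.com/pawelprzegon/DUR-Raports | raporty_api/inputData.py | getDeklData
-- ===== SOURCE A (Python) =====
-- def getDeklData(data):
--     adam, pawel, bartek = '', '', ''
--     for each in data:
--         for key,value in each.items():
--             match key:
--                 case 'Adam':
--                     adam = value
--                 case 'Pawel':
--                     pawel = value
--                 case 'Bartek':
--                     bartek = value
--     return adam, pawel, bartek
-- ===== SOURCE B (Python) =====
-- def getDeklData(data):
--     merged = {}
--     for each in data:
--         merged.update(each)
--     return merged.get('Adam', ''), merged.get('Pawel', ''), merged.get('Bartek', '')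
-- ===== Notes on version B (the rewrite author's own statement) =====
-- stated objective: simpler
-- what changed: Replaces the per-key match inside a nested loop by building one merged dict with update() and doing three constant-time lookups with defaults afterwards.
import Mathlib
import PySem

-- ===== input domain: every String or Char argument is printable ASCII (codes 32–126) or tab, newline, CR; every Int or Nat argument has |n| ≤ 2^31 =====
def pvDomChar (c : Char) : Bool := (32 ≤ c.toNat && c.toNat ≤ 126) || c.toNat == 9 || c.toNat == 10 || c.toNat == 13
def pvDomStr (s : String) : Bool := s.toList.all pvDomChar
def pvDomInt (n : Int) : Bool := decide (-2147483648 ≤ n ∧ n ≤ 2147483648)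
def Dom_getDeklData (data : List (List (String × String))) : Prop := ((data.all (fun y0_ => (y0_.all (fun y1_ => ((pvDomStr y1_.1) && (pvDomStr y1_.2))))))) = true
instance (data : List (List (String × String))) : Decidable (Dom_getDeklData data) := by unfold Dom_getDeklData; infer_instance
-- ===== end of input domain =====

-- B builds one merged dict (dict.update per element) and does three default lookups,
-- instead of A's nested loop matching each key; return values only, no mutation involved.
-- ===== PORT A =====
def getDeklData (data : List (List (String × String))) : String × String × String :=
  let st := data.foldl (fun acc each =>
    each.foldl (fun (acc : String × String × String) kv =>
      match kv.1 with
      | "Adam" => (kv.2, acc.2.1, acc.2.2)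
      | "Pawel" => (acc.1, kv.2, acc.2.2)
      | "Bartek" => (acc.1, acc.2.1, kv.2)
      | _ => acc) acc) ("", "", "")
  st

-- ===== PORT B =====
def getDeklData_alt (data : List (List (String × String))) : String × String × String :=
  let merged := data.foldl (fun d each => PySem.Dict.update d each)
    (PySem.Dict.empty : PySem.Dict String String)
  (merged.getD "Adam" "", merged.getD "Pawel" "", merged.getD "Bartek" "")

-- ===== PRECONDITION & SPEC =====
def Spec_getDeklData (data : List (List (String × String))) (out : String × String × String) : Prop := out = getDeklData_alt data
instance (data : List (List (String × String))) (out : String × String × String) : Decidable (Spec_getDeklData data out) := by unfold Spec_getDeklData; infer_instance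

-- ===== CLAIM (what is proved, stated in full; the proofs are below) =====
def Claim_equal_getDeklData : Prop := ∀ (data : List (List (String × String))), Dom_getDeklData data → Spec_getDeklData data (getDeklData data)

-- ===== LEMMAS AND PROOFS =====

-- dict.update is exactly a left fold of insert over the pairs
theorem update_eq_foldl {d : PySem.Dict String String} {l : List (String × String)} :
    PySem.Dict.update d l = l.foldl (fun d kv => d.insert kv.1 kv.2) d := by
  induction l generalizing d with
  | nil => rfl
  | cons kv t ih => simp only [PySem.Dict.update, List.foldl] at *

-- one loop step: A's triple update from the lookups of d = the lookups of d.insert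
theorem stepA_eq (d : PySem.Dict String String) (kv : String × String) :
    (match kv.1 with
     | "Adam" => (kv.2, (d.getD "Pawel" "", d.getD "Bartek" ""))
     | "Pawel" => (d.getD "Adam" "", kv.2, d.getD "Bartek" "")
     | "Bartek" => (d.getD "Adam" "", d.getD "Pawel" "", kv.2)
     | _ => (d.getD "Adam" "", d.getD "Pawel" "", d.getD "Bartek" "")) =
    ((d.insert kv.1 kv.2).getD "Adam" "", (d.insert kv.1 kv.2).getD "Pawel" "",
      (d.insert kv.1 kv.2).getD "Bartek" "") := by
  simp only [PySem.Dict.getD_insert]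
  split
  case h_1 x heq => simp [heq]
  case h_2 x heq => simp [heq]
  case h_3 x heq => simp [heq]
  case h_4 x h1 h2 h3 =>
    rw [if_neg (fun h => h1 h.symm), if_neg (fun h => h2 h.symm), if_neg (fun h => h3 h.symm)]

-- invariant over one inner loop
theorem inner_inv (l : List (String × String)) (d : PySem.Dict String String) :
    l.foldl (fun (acc : String × String × String) kv =>
      match kv.1 with
      | "Adam" => (kv.2, acc.2.1, acc.2.2)
      | "Pawel" => (acc.1, kv.2, acc.2.2)
      | "Bartek" => (acc.1, acc.2.1, kv.2)
      | _ => acc) (d.getD "Adam" "", d.getD "Pawel" "", d.getD "Bartek" "") =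
    ((PySem.Dict.update d l).getD "Adam" "", (PySem.Dict.update d l).getD "Pawel" "",
      (PySem.Dict.update d l).getD "Bartek" "") := by
  induction l generalizing d with
  | nil => rfl
  | cons kv t ih =>
    simp only [update_eq_foldl] at ih ⊢
    simp only [List.foldl]
    rw [show (match kv.1 with
      | "Adam" => (kv.2, ((d.getD "Adam" "", d.getD "Pawel" "", d.getD "Bartek" "") :
          String × String × String).2.1,
          ((d.getD "Adam" "", d.getD "Pawel" "", d.getD "Bartek" "") : String × String × String).2.2)
      | "Pawel" => (((d.getD "Adam" "", d.getD "Pawel" "", d.getD "Bartek" "") :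
          String × String × String).1, kv.2,
          ((d.getD "Adam" "", d.getD "Pawel" "", d.getD "Bartek" "") : String × String × String).2.2)
      | "Bartek" => (((d.getD "Adam" "", d.getD "Pawel" "", d.getD "Bartek" "") :
          String × String × String).1,
          ((d.getD "Adam" "", d.getD "Pawel" "", d.getD "Bartek" "") : String × String × String).2.1, kv.2)
      | _ => ((d.getD "Adam" "", d.getD "Pawel" "", d.getD "Bartek" "") : String × String × String)) =
      ((d.insert kv.1 kv.2).getD "Adam" "", (d.insert kv.1 kv.2).getD "Pawel" "",
        (d.insert kv.1 kv.2).getD "Bartek" "") from stepA_eq d kv]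
    exact ih _

-- invariant over the outer loop
theorem outer_inv (data : List (List (String × String))) (d : PySem.Dict String String) :
    data.foldl (fun acc each =>
      each.foldl (fun (acc : String × String × String) kv =>
        match kv.1 with
        | "Adam" => (kv.2, acc.2.1, acc.2.2)
        | "Pawel" => (acc.1, kv.2, acc.2.2)
        | "Bartek" => (acc.1, acc.2.1, kv.2)
        | _ => acc) acc)
      (d.getD "Adam" "", d.getD "Pawel" "", d.getD "Bartek" "") =
    ((data.foldl (fun d each => PySem.Dict.update d each) d).getD "Adam" "",
     (data.foldl (fun d each => PySem.Dict.update d each) d).getD "Pawel" "",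
     (data.foldl (fun d each => PySem.Dict.update d each) d).getD "Bartek" "") := by
  induction data generalizing d with
  | nil => rfl
  | cons each t ih =>
    simp only [List.foldl]
    rw [inner_inv each d]
    exact ih _

-- ===== VERDICT (by name: the statement is the Claim_ definition above) =====
theorem getDeklData_spec : Claim_equal_getDeklData := by
  intro data _
  unfold Spec_getDeklData getDeklData getDeklData_alt
  simpa [PySem.Dict.getD_empty] using outer_inv data PySem.Dict.empty
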